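-- pv_equiv track=rewrite | github.com/dillionaire/regen | unicode_regex/optimizer.py | optimize_readability
-- ===== SOURCE A (Python) =====
-- def optimize_readability(pattern: str) -> str:
--     """Optimize pattern readability by adding appropriate spacing.
--
--     This method improves the readability of regex patterns by adding spaces
--     around alternation operators (|) when they're not inside character classes.
--     It preserves the pattern's functionality while making it more readable.
--
--     Args:
--         pattern: The regex pattern to optimize for readability.
--
--     Returns:
--         The pattern with improved spacing for better readability.
--
--     Examples:
--         >>> optimizer = Optimizer()
--         >>> optimizer.optimize_readability('foo|bar|baz')
--         'foo | bar | baz'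
--         >>> optimizer.optimize_readability('[a|b]')
--         '[a|b]'  # No spaces added inside character class
--     """
--     if not pattern:
--         return pattern
--
--     # Add spaces around alternations outside character classes
--     in_class = False
--     result = []
--     for i, c in enumerate(pattern):
--         if c == '[':
--             in_class = True
--         elif c == ']':
--             in_class = False
--         elif c == '|' and not in_class:
--             if i > 0 and pattern[i-1] != ' ':
--                 result.append(' ')
--             result.append(c)
--             if i < len(pattern)-1 and pattern[i+1] != ' ':
--                 result.append(' ')
--             continue
--         result.append(c)
--
--     return ''.join(result)
-- ===== SOURCE B (Python) =====
-- def optimize_readability(pattern: str) -> str: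
--     # Block-consuming rewrite: copy character-class blocks whole (via find),
--     # space bare '|' using the original neighbour characters.
--     out = []
--     i, n = 0, len(pattern)
--     while i < n:
--         c = pattern[i]
--         if c == '[':
--             j = pattern.find(']', i)
--             j = n - 1 if j == -1 else j
--             out.append(pattern[i:j + 1])
--             i = j + 1
--         elif c == '|':
--             if i > 0 and pattern[i - 1] != ' ':
--                 out.append(' ')
--             out.append('|')
--             if i < n - 1 and pattern[i + 1] != ' ':
--                 out.append(' ')
--             i += 1
--         else:
--             out.append(c)
--             i += 1
--     return ''.join(out)
-- ===== Notes on version B (the rewrite author's own statement) =====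
-- stated objective: alternative
-- what changed: Replaces the per-character state machine with an in_class boolean by a block-consuming scan: a character-class block from '[' through the next ']' (or end of string) is located with str.find and copied whole as one slice, so no class flag exists and '|' handling only ever runs outside classes.
import Mathlib
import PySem

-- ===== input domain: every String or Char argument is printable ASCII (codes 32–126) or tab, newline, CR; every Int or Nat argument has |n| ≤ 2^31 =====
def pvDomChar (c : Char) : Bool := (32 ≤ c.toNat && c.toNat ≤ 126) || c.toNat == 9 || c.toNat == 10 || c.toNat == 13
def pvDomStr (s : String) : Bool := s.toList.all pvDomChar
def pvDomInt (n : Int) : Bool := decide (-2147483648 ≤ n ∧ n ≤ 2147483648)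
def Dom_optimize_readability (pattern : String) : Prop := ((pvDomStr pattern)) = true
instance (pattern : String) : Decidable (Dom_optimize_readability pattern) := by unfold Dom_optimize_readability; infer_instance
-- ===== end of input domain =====

-- B replaces A's per-character in_class state machine by a block-consuming scan that
-- copies each character class '['..']' whole; same output (alternative decomposition).

-- ===== PORT A =====
-- loop body of A's 'for i, c in enumerate(pattern)'
def aStep (cs : List Char) (st : Bool × List Char) (ic : Int × Char) : Bool × List Char :=
  let in_class := st.1
  let result := st.2
  let i := ic.1
  let c := ic.2
  if c = '[' then
    (true, result ++ [c])
  else if c = ']' then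
    (false, result ++ [c])
  else if c = '|' ∧ in_class = false then
    let result := if 0 < i ∧ PySem.List.pyGet? cs (i - 1) ≠ some ' ' then result ++ [' '] else result
    let result := result ++ [c]
    let result := if i < (cs.length : Int) - 1 ∧ PySem.List.pyGet? cs (i + 1) ≠ some ' ' then result ++ [' '] else result
    (in_class, result)
  else
    (in_class, result ++ [c])

def optimize_readability (pattern : String) : String :=
  if pattern = "" then pattern
  else
    let cs := pattern.toList
    String.mk (((PySem.List.enumerate cs 0).foldl (aStep cs) (false, [])).2)

-- ===== PORT B =====
-- B's while loop: '[' consumes the whole class block (find ']' = dropWhile), '|' is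
-- spaced using the original neighbours p[i-1] / p[i+1], other chars are copied.
def altGo (p : List Char) : Nat → List Char → List Char
  | _, [] => []
  | i, c :: cs =>
    if c = '[' then
      match h : cs.dropWhile (· ≠ ']') with
      | [] => c :: cs                     -- no ']' found: copy the rest unchanged
      | r :: rs =>
        let cls := cs.takeWhile (· ≠ ']')
        (c :: (cls ++ [r])) ++ altGo p (i + cls.length + 2) rs
    else if c = '|' then
      (if 0 < i ∧ p[i-1]? ≠ some ' ' then [' '] else []) ++ [c] ++
      (if i + 1 < p.length ∧ p[i+1]? ≠ some ' ' then [' '] else []) ++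
      altGo p (i + 1) cs
    else
      c :: altGo p (i + 1) cs
  termination_by _ l => l.length
  decreasing_by
    · have h1 : (cs.dropWhile (· ≠ ']')).length ≤ cs.length :=
        (List.dropWhile_sublist _).length_le
      rw [h] at h1
      simp at h1 ⊢
      omega
    · simp
    · simp

def optimize_readability_alt (pattern : String) : String :=
  String.mk (altGo pattern.toList 0 pattern.toList)

-- ===== PRECONDITION & SPEC =====
def Spec_optimize_readability (pattern : String) (out : String) : Prop := out = optimize_readability_alt pattern
instance (pattern : String) (out : String) : Decidable (Spec_optimize_readability pattern out) := by unfold Spec_optimize_readability; infer_instance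

-- ===== CLAIM (what is proved, stated in full; the proofs are below) =====
def Claim_equal_optimize_readability : Prop := ∀ (pattern : String), Dom_optimize_readability pattern → Spec_optimize_readability pattern (optimize_readability pattern)

-- ===== LEMMAS AND PROOFS =====

-- inside a class A's loop only copies characters (the flag stays set) until a ']'
lemma fold_inclass (cs : List Char) (l : List Char) (hl : ∀ x ∈ l, x ≠ ']') :
    ∀ (j : Int) (acc : List Char),
      (PySem.List.enumerate l j).foldl (aStep cs) (true, acc) = (true, acc ++ l) := by
  induction l with
  | nil => intro j acc; simp [PySem.List.enumerate]
  | cons c t ih =>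
    intro j acc
    have hc : c ≠ ']' := hl c (by simp)
    rw [PySem.List.enumerate_cons]
    simp only [List.foldl_cons]
    have hstep : aStep cs (true, acc) (j, c) = (true, acc ++ [c]) := by
      by_cases h1 : c = '[' <;> simp [aStep, h1, hc]
    rw [hstep, ih (fun x hx => hl x (by simp [hx]))]
    simp

lemma dropWhile_cons_head (l : List Char) (r : Char) (rs : List Char)
    (h : l.dropWhile (· ≠ ']') = r :: rs) : r = ']' := by
  induction l with
  | nil => simp at h
  | cons a t ih =>
    rw [List.dropWhile_cons] at h
    split at h
    · exact ih h
    · rename_i hpred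
      simp at hpred
      cases h
      exact hpred

lemma drop_cons_succ (cs : List Char) (i : Nat) (c : Char) (cs' : List Char)
    (h : cs.drop i = c :: cs') : cs.drop (i+1) = cs' := by
  have := congrArg List.tail h
  simpa [List.tail_drop] using this

lemma aStep_bar (cs : List Char) (acc : List Char) (i : Nat) :
    aStep cs (false, acc) ((i : Int), '|') =
      (false, ((if 0 < i ∧ cs[i-1]? ≠ some ' ' then acc ++ [' '] else acc) ++ ['|'])
               ++ (if i + 1 < cs.length ∧ cs[i+1]? ≠ some ' ' then [' '] else [])) := by
  have e1 : (0 < (i:Int) ∧ PySem.List.pyGet? cs ((i:Int) - 1) ≠ some ' ')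
      ↔ (0 < i ∧ cs[i-1]? ≠ some ' ') := by
    constructor
    · rintro ⟨hp, hg⟩
      have hi : 0 < i := by exact_mod_cast hp
      refine ⟨hi, ?_⟩
      rwa [show (i:Int) - 1 = ((i-1 : Nat) : Int) by omega, PySem.List.pyGet?_natCast] at hg
    · rintro ⟨hi, hg⟩
      exact ⟨by exact_mod_cast hi,
        by rwa [show (i:Int) - 1 = ((i-1 : Nat) : Int) by omega, PySem.List.pyGet?_natCast]⟩
  have e2 : ((i:Int) < (cs.length : Int) - 1 ∧ PySem.List.pyGet? cs ((i:Int) + 1) ≠ some ' ')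
      ↔ (i + 1 < cs.length ∧ cs[i+1]? ≠ some ' ') := by
    rw [show (i:Int) + 1 = ((i+1 : Nat) : Int) by omega, PySem.List.pyGet?_natCast]
    constructor
    · rintro ⟨hp, hg⟩; exact ⟨by omega, hg⟩
    · rintro ⟨hp, hg⟩; exact ⟨by omega, hg⟩
  simp only [aStep]
  simp only [e1, e2]
  by_cases hc1 : 0 < i ∧ cs[i-1]? ≠ some ' ' <;>
    by_cases hc2 : i + 1 < cs.length ∧ cs[i+1]? ≠ some ' ' <;>
      simp [hc1, hc2, List.append_assoc] <;> (split_ifs <;> simp)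

lemma fold_eq_altGo (cs : List Char) :
    ∀ (n : Nat) (suffix : List Char), suffix.length ≤ n →
    ∀ (i : Nat) (acc : List Char), cs.drop i = suffix →
      ((PySem.List.enumerate suffix (i : Int)).foldl (aStep cs) (false, acc)).2
        = acc ++ altGo cs i suffix := by
  intro n
  induction n with
  | zero =>
    intro suffix hlen i acc hdrop
    have hnil : suffix = [] := List.length_eq_zero_iff.mp (Nat.le_zero.mp hlen)
    subst hnil
    simp [altGo, PySem.List.enumerate]
  | succ n ih =>
    intro suffix hlen i acc hdrop
    match suffix, hlen, hdrop with
    | [], _, _ => simp [altGo, PySem.List.enumerate]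
    | c :: cs', hlen, hdrop =>
      rw [PySem.List.enumerate_cons, List.foldl_cons]
      have hd1 : cs.drop (i+1) = cs' := drop_cons_succ cs i c cs' hdrop
      by_cases h1 : c = '['
      · subst h1
        have hstep : aStep cs (false, acc) ((i:Int), '[') = (true, acc ++ ['[']) := by
          simp [aStep]
        rw [hstep]
        rcases hr : cs'.dropWhile (· ≠ ']') with _ | ⟨r, rs⟩
        · have hall : ∀ x ∈ cs', x ≠ ']' := by
            intro x hx
            simpa using List.dropWhile_eq_nil_iff.mp hr x hx
          rw [fold_inclass cs cs' hall]
          conv_rhs => rw [altGo]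
          rw [hr]
          simp
        · have hrx : r = ']' := dropWhile_cons_head cs' r rs hr
          have hsplit : cs'.takeWhile (· ≠ ']') ++ r :: rs = cs' := by
            conv_rhs => rw [← List.takeWhile_append_dropWhile (p := (· ≠ ']')) (l := cs')]
            rw [hr]
          set cls := cs'.takeWhile (· ≠ ']') with hcls
          have hallcls : ∀ x ∈ cls, x ≠ ']' := by
            intro x hx
            simpa using List.mem_takeWhile_imp hx
          conv_lhs => rw [← hsplit]
          rw [PySem.List.enumerate_append, List.foldl_append,
              fold_inclass cs cls hallcls, PySem.List.enumerate_cons, List.foldl_cons]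
          have hstep2 : aStep cs (true, (acc ++ ['[']) ++ cls) (((i:Int)+1) + (cls.length : Int), r)
              = (false, ((acc ++ ['[']) ++ cls) ++ [r]) := by
            subst hrx; simp [aStep]
          rw [hstep2]
          have harith : ((i:Int)+1) + (cls.length : Int) + 1 = ((i + cls.length + 2 : Nat) : Int) := by
            push_cast; ring
          rw [harith]
          have hdrop2 : cs.drop (i + cls.length + 2) = rs := by
            have h2 : cs.drop (i + 1 + cls.length) = r :: rs := by
              rw [← List.drop_drop, hd1, ← hsplit, List.drop_left]
            have := drop_cons_succ cs (i + 1 + cls.length) r rs h2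
            rwa [show i + 1 + cls.length + 1 = i + cls.length + 2 by omega] at this
          have hlen2 : rs.length ≤ n := by
            have : cs'.length = cls.length + 1 + rs.length := by
              rw [← hsplit]; simp; omega
            simp at hlen
            omega
          rw [ih rs hlen2 (i + cls.length + 2) _ hdrop2]
          conv_rhs => rw [altGo]
          rw [hr, ← hcls]
          simp [List.append_assoc]
      · by_cases h2 : c = ']'
        · subst h2
          have hstep : aStep cs (false, acc) ((i:Int), ']') = (false, acc ++ [']']) := by
            simp [aStep]
          rw [hstep]
          rw [show (i:Int) + 1 = ((i+1 : Nat) : Int) by push_cast; ring]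
          rw [ih cs' (by simpa using hlen) (i+1) _ hd1]
          conv_rhs => rw [altGo]
          simp [List.append_assoc]
        · by_cases h3 : c = '|'
          · subst h3
            rw [aStep_bar]
            rw [show (i:Int) + 1 = ((i+1 : Nat) : Int) by push_cast; ring]
            rw [ih cs' (by simpa using hlen) (i+1) _ hd1]
            conv_rhs => rw [altGo]
            simp [List.append_assoc]
            split_ifs <;> simp
          · have hstep : aStep cs (false, acc) ((i:Int), c) = (false, acc ++ [c]) := by
              simp [aStep, h1, h2, h3]
            rw [hstep]
            rw [show (i:Int) + 1 = ((i+1 : Nat) : Int) by push_cast; ring]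
            rw [ih cs' (by simpa using hlen) (i+1) _ hd1]
            conv_rhs => rw [altGo]
            simp [h1, h3, List.append_assoc]

theorem optimize_readability_spec : Claim_equal_optimize_readability := by
  intro pattern _
  show optimize_readability pattern = optimize_readability_alt pattern
  by_cases hp : pattern = ""
  · subst hp
    show optimize_readability "" = _
    simp [optimize_readability, optimize_readability_alt, altGo]
    rfl
  · unfold optimize_readability optimize_readability_alt
    rw [if_neg hp]
    show String.mk (((PySem.List.enumerate pattern.toList 0).foldl (aStep pattern.toList) (false, [])).2) = _
    have := fold_eq_altGo pattern.toList pattern.toList.length pattern.toList le_rfl 0 [] (by simp)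
    simp only [Nat.cast_zero] at this
    rw [this, List.nil_append]
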